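-- pv_equiv track=rewrite | github.com/ihmeuw/ihme-modeling | shared_code/central_comp/non_fatal/como/como/common.py | cap_val
-- ===== SOURCE A (Python) =====
-- def cap_val(val_list, ref_list):
--     """Given a list of numerical values val_list,
--     find the upper and lower nearest neighbors
--     and any interior neighbors in ref_list"""
--     assert (len(val_list) > 0) and (len(ref_list) > 1), (
--         "val_list must have at least 1 value, ref_list at least 2")
--     lower = [ref for ref in ref_list if all(val >= ref for val in val_list)]
--     if len(lower) > 0:
--         lower = max(lower)
--     else:
--         raise ValueError(
--             "The lowest value {min_reflist} is greater "
--             "than the lowest value in {min_valist}. "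
--             "Your reference list may need to be updated".format(
--                 min_reflist=min(ref_list),
--                 min_valist=min(val_list)))
--     upper = [ref for ref in ref_list if all(val <= ref for val in val_list)]
--     if len(upper) > 0:
--         upper = min(upper)
--     else:
--         raise ValueError(
--             "The greatest value {max_reflist} is less "
--             "than the greatest value in {max_valist}. "
--             "Your reference list may need to be updated".format(
--                 max_reflist=max(ref_list),
--                 max_valist=max(val_list)))
--     inner_list = [
--         ref for ref in ref_list
--         if ref > min(val_list) and ref < max(val_list)]
--     return [lower, upper] + inner_list
-- ===== SOURCE B (Python) =====
-- def cap_val(val_list, ref_list):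
--     """Single O(n+m) pass: precompute min/max of val_list, then scan
--     ref_list once tracking the nearest lower/upper neighbors and the
--     interior neighbors."""
--     assert (len(val_list) > 0) and (len(ref_list) > 1), (
--         "val_list must have at least 1 value, ref_list at least 2")
--     lo_v = min(val_list)
--     hi_v = max(val_list)
--     lower = None
--     upper = None
--     inner = []
--     for ref in ref_list:
--         if ref <= lo_v and (lower is None or ref > lower):
--             lower = ref
--         if ref >= hi_v and (upper is None or ref < upper):
--             upper = ref
--         if lo_v < ref < hi_v:
--             inner.append(ref)
--     if lower is None:
--         raise ValueError(
--             "The lowest value {min_reflist} is greater "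
--             "than the lowest value in {min_valist}. "
--             "Your reference list may need to be updated".format(
--                 min_reflist=min(ref_list), min_valist=lo_v))
--     if upper is None:
--         raise ValueError(
--             "The greatest value {max_reflist} is less "
--             "than the greatest value in {max_valist}. "
--             "Your reference list may need to be updated".format(
--                 max_reflist=max(ref_list), max_valist=hi_v))
--     return [lower, upper] + inner
-- ===== Notes on version B (the rewrite author's own statement) =====
-- stated objective: faster
-- what changed: Replaces the three full scans of ref_list that each re-scan all of val_list (all(...) inside a comprehension) by precomputing min/max of val_list once and a single O(m) pass over ref_list maintaining the running lower/upper neighbor and the interior list.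
import Mathlib
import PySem

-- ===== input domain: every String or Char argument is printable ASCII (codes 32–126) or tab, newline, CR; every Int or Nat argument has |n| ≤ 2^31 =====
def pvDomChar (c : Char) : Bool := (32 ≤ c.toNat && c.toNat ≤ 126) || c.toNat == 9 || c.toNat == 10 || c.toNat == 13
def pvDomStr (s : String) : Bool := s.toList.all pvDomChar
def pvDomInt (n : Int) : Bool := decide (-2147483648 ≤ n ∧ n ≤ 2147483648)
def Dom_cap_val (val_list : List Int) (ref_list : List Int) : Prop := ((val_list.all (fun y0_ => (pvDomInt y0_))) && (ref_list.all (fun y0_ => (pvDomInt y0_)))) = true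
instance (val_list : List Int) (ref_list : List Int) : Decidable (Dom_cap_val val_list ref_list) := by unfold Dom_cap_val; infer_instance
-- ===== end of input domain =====

-- B replaces A's three full scans of ref_list (each re-scanning val_list via all(...))
-- by precomputed min/max of val_list and one pass over ref_list: O(m+n) instead of O(m*n).


-- ===== PORT A =====
def cap_val (val_list : List Int) (ref_list : List Int) : List Int :=
  if 0 < val_list.length ∧ 1 < ref_list.length then
    -- lower = [ref for ref in ref_list if all(val >= ref for val in val_list)]
    let lowerL := ref_list.filter (fun ref => val_list.all (fun val => decide (ref ≤ val)))
    match PySem.List.max? lowerL (fun y => y) with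
    | none => []          -- raise ValueError (excluded by Pre_)
    | some lower =>
      let upperL := ref_list.filter (fun ref => val_list.all (fun val => decide (val ≤ ref)))
      match PySem.List.min? upperL (fun y => y) with
      | none => []        -- raise ValueError (excluded by Pre_)
      | some upper =>
        let mn := (PySem.List.min? val_list (fun y => y)).getD 0
        let mx := (PySem.List.max? val_list (fun y => y)).getD 0
        let inner := ref_list.filter (fun ref => decide (mn < ref) && decide (ref < mx))
        [lower, upper] ++ inner
  else []                 -- AssertionError (excluded by Pre_)

-- ===== PORT B =====
-- the three independent per-element updates of B's single loop body
def gLo (loV : Int) (a : Option Int) (r : Int) : Option Int :=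
  if decide (r ≤ loV) && (match a with | none => true | some x => decide (x < r)) then some r else a
def gUp (hiV : Int) (a : Option Int) (r : Int) : Option Int :=
  if decide (hiV ≤ r) && (match a with | none => true | some x => decide (r < x)) then some r else a
def gInn (loV hiV : Int) (inn : List Int) (r : Int) : List Int :=
  if decide (loV < r) && decide (r < hiV) then inn ++ [r] else inn
def capStep (loV hiV : Int) (st : Option Int × Option Int × List Int) (r : Int) :
    Option Int × Option Int × List Int :=
  (gLo loV st.1 r, gUp hiV st.2.1 r, gInn loV hiV st.2.2 r)

def cap_val_alt (val_list : List Int) (ref_list : List Int) : List Int :=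
  if 0 < val_list.length ∧ 1 < ref_list.length then
    let loV := (PySem.List.min? val_list (fun y => y)).getD 0
    let hiV := (PySem.List.max? val_list (fun y => y)).getD 0
    let st := ref_list.foldl (capStep loV hiV) (none, none, [])
    match st.1, st.2.1 with
    | some lower, some upper => [lower, upper] ++ st.2.2
    | _, _ => []            -- raise ValueError (excluded by Pre_)
  else []                   -- AssertionError (excluded by Pre_)

-- ===== PRECONDITION & SPEC =====
-- Pre_ excludes exactly the inputs where A raises: the assert (empty val_list or
-- ref_list shorter than 2) and the two explicit ValueErrors (no reference at or
-- below min(val_list), or none at or above max(val_list)). B raises there too.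
def Pre_cap_val (val_list : List Int) (ref_list : List Int) : Prop :=
  0 < val_list.length ∧ 1 < ref_list.length ∧
  (∃ r ∈ ref_list, ∀ v ∈ val_list, r ≤ v) ∧
  (∃ r ∈ ref_list, ∀ v ∈ val_list, v ≤ r)
instance (val_list : List Int) (ref_list : List Int) : Decidable (Pre_cap_val val_list ref_list) := by
  unfold Pre_cap_val; infer_instance

def pvWitness_cap_val : List Int × List Int := ([1, 3], [0, 2, 5])

def Spec_cap_val (val_list : List Int) (ref_list : List Int) (out : List Int) : Prop := out = cap_val_alt val_list ref_list
instance (val_list : List Int) (ref_list : List Int) (out : List Int) : Decidable (Spec_cap_val val_list ref_list out) := by unfold Spec_cap_val; infer_instance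

-- ===== CLAIM (what is proved, stated in full; the proofs are below) =====
def Claim_equal_cap_val : Prop := ∀ (val_list : List Int) (ref_list : List Int), Dom_cap_val val_list ref_list → Pre_cap_val val_list ref_list → Spec_cap_val val_list ref_list (cap_val val_list ref_list)

-- ===== LEMMAS AND PROOFS =====

lemma le_foldl_min_iff (v : Int) (vt : List Int) (r : Int) :
    r ≤ vt.foldl min v ↔ ∀ y ∈ v :: vt, r ≤ y := by
  constructor
  · intro h y hy
    rcases List.mem_cons.mp hy with rfl | hy
    · exact le_trans h (PySem.List.foldl_min_le vt y).1
    · exact le_trans h ((PySem.List.foldl_min_le vt v).2 y hy)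
  · intro h
    rcases PySem.List.foldl_min_mem vt v with he | he
    · rw [he]; exact h v (by simp)
    · exact h _ (List.mem_cons_of_mem _ he)

lemma foldl_max_le_iff (v : Int) (vt : List Int) (r : Int) :
    vt.foldl max v ≤ r ↔ ∀ y ∈ v :: vt, y ≤ r := by
  constructor
  · intro h y hy
    rcases List.mem_cons.mp hy with rfl | hy
    · exact le_trans (PySem.List.le_foldl_max vt y).1 h
    · exact le_trans ((PySem.List.le_foldl_max vt v).2 y hy) h
  · intro h
    rcases PySem.List.foldl_max_mem vt v with he | he
    · rw [he]; exact h v (by simp)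
    · exact h _ (List.mem_cons_of_mem _ he)

lemma all_ge_eq (v : Int) (vt : List Int) (r : Int) :
    (v :: vt).all (fun x => decide (r ≤ x)) = decide (r ≤ vt.foldl min v) := by
  rw [Bool.eq_iff_iff]; simp [List.all_eq_true, le_foldl_min_iff v vt r]

lemma all_le_eq (v : Int) (vt : List Int) (r : Int) :
    (v :: vt).all (fun x => decide (x ≤ r)) = decide (vt.foldl max v ≤ r) := by
  rw [Bool.eq_iff_iff]; simp [List.all_eq_true, foldl_max_le_iff v vt r]

lemma foldl_gLo_some (loV : Int) (rs : List Int) : ∀ (x : Int),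
    rs.foldl (gLo loV) (some x) = some ((rs.filter (fun r => decide (r ≤ loV))).foldl max x) := by
  induction rs with
  | nil => intro x; simp
  | cons r t ih =>
    intro x
    by_cases h : r ≤ loV
    · simp only [List.foldl_cons, List.filter_cons, gLo, h, decide_true, Bool.true_and]
      by_cases hx : x < r
      · simp [hx, ih, max_eq_right (le_of_lt hx)]
      · simp [hx, ih, max_eq_left (not_lt.mp hx)]
    · simp [List.foldl_cons, gLo, h, ih]

lemma foldl_gLo_none (loV : Int) (rs : List Int) :
    rs.foldl (gLo loV) none =
      (match rs.filter (fun r => decide (r ≤ loV)) with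
       | [] => none
       | y :: t => some (t.foldl max y)) := by
  induction rs with
  | nil => simp
  | cons r t ih =>
    by_cases h : r ≤ loV
    · simp [List.foldl_cons, gLo, h, foldl_gLo_some]
    · simp [List.foldl_cons, gLo, h, ih]

lemma foldl_gUp_some (hiV : Int) (rs : List Int) : ∀ (x : Int),
    rs.foldl (gUp hiV) (some x) = some ((rs.filter (fun r => decide (hiV ≤ r))).foldl min x) := by
  induction rs with
  | nil => intro x; simp
  | cons r t ih =>
    intro x
    by_cases h : hiV ≤ r
    · simp only [List.foldl_cons, List.filter_cons, gUp, h, decide_true, Bool.true_and]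
      by_cases hx : r < x
      · simp [hx, ih, min_eq_right (le_of_lt hx)]
      · simp [hx, ih, min_eq_left (not_lt.mp hx)]
    · simp [List.foldl_cons, gUp, h, ih]

lemma foldl_gUp_none (hiV : Int) (rs : List Int) :
    rs.foldl (gUp hiV) none =
      (match rs.filter (fun r => decide (hiV ≤ r)) with
       | [] => none
       | y :: t => some (t.foldl min y)) := by
  induction rs with
  | nil => simp
  | cons r t ih =>
    by_cases h : hiV ≤ r
    · simp [List.foldl_cons, gUp, h, foldl_gUp_some]
    · simp [List.foldl_cons, gUp, h, ih]

lemma fold_split (loV hiV : Int) (rs : List Int) : ∀ (l u : Option Int) (inn : List Int),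
    rs.foldl (capStep loV hiV) (l, u, inn)
      = (rs.foldl (gLo loV) l, rs.foldl (gUp hiV) u, rs.foldl (gInn loV hiV) inn) := by
  induction rs with
  | nil => intro l u inn; simp
  | cons r t ih => intro l u inn; simp [List.foldl_cons, capStep, ih]

lemma foldl_gInn_eq (loV hiV : Int) (rs : List Int) (acc : List Int) :
    rs.foldl (gInn loV hiV) acc = acc ++ rs.filter (fun r => decide (loV < r) && decide (r < hiV)) := by
  unfold gInn
  exact PySem.List.foldl_append_if_eq_filter _ _ _

-- ===== VERDICT (by name: the statement is the Claim_ definition above) =====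
theorem cap_val_spec : Claim_equal_cap_val := by
  intro val_list ref_list _ hpre
  obtain ⟨h1, h2, ⟨rl, hrl, hrlall⟩, ⟨ru, hru, hruall⟩⟩ := hpre
  unfold Spec_cap_val cap_val cap_val_alt
  obtain ⟨v, vt, rfl⟩ : ∃ v vt, val_list = v :: vt := by
    cases val_list with
    | nil => simp at h1
    | cons v vt => exact ⟨v, vt, rfl⟩
  have hc : 0 < (v :: vt).length ∧ 1 < ref_list.length := ⟨h1, h2⟩
  simp only [if_pos hc, PySem.List.min?_id_cons, PySem.List.max?_id_cons, Option.getD_some]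
  rw [fold_split]
  rw [List.filter_congr (fun r _ => all_ge_eq v vt r),
      List.filter_congr (fun r _ => all_le_eq v vt r),
      foldl_gLo_none, foldl_gUp_none, foldl_gInn_eq]
  have hlo : rl ∈ ref_list.filter (fun r => decide (r ≤ vt.foldl min v)) := by
    simp only [List.mem_filter, decide_eq_true_iff]
    exact ⟨hrl, (le_foldl_min_iff v vt rl).mpr hrlall⟩
  have hup : ru ∈ ref_list.filter (fun r => decide (vt.foldl max v ≤ r)) := by
    simp only [List.mem_filter, decide_eq_true_iff]
    exact ⟨hru, (foldl_max_le_iff v vt ru).mpr hruall⟩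
  cases heqlo : ref_list.filter (fun r => decide (r ≤ vt.foldl min v)) with
  | nil => rw [heqlo] at hlo; simp at hlo
  | cons y t =>
    cases hequp : ref_list.filter (fun r => decide (vt.foldl max v ≤ r)) with
    | nil => rw [hequp] at hup; simp at hup
    | cons z s => simp [PySem.List.max?_id_cons, PySem.List.min?_id_cons]
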